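-- pv_equiv track=rewrite | github.com/Min-su-Jeong/Algorithm_Study | 프로그래머스/unrated/138477. 명예의 전당 （1）/명예의 전당 （1）.py | solution
-- ===== SOURCE A (Python) =====
-- def solution(k, score):
--     stack = []
--     res = []
--     for s in score:         # score의 요소 하나씩 꺼내기
--         if len(stack) < k:  # stack의 길이가 k보다 작은 경우
--             stack.append(s) # 요소 삽입
--         else:
--             if s > stack[-1]:   # stack에서 가장 작은 값보다 s가 큰 경우
--                 stack.pop()     # 가장 작은 값 제거
--                 stack.append(s) # stack에 s 삽입
--
--         stack = sorted(stack, reverse=True) # 내림차순 정렬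
--         res.append(stack[-1]) # 결과값에 stack에서 가장 작은 값 추가
--
--     return res
-- ===== SOURCE B (Python) =====
-- def solution(k, score):
--     top = []   # ascending list of the current top-k scores
--     res = []
--     for s in score:
--         if len(top) == k and s <= top[0]:
--             # hall is full and s does not beat the current minimum
--             res.append(top[0])
--             continue
--         # binary search for the leftmost position with top[pos] >= s
--         lo, hi = 0, len(top)
--         while lo < hi:
--             mid = (lo + hi) // 2
--             if top[mid] < s:
--                 lo = mid + 1
--             else:
--                 hi = mid
--         top.insert(lo, s)
--         if len(top) > k:
--             del top[0]   # drop the smallest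
--         res.append(top[0])
--     return res
-- ===== Notes on version B (the rewrite author's own statement) =====
-- stated objective: faster
-- what changed: Instead of re-sorting the whole k-element hall after every score, B keeps it as an ascending list and does one binary-search insertion per score (skipped entirely when the hall is full and s does not beat its minimum), dropping the smallest element when the list exceeds k; the minimum is the first element.
import Mathlib
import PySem

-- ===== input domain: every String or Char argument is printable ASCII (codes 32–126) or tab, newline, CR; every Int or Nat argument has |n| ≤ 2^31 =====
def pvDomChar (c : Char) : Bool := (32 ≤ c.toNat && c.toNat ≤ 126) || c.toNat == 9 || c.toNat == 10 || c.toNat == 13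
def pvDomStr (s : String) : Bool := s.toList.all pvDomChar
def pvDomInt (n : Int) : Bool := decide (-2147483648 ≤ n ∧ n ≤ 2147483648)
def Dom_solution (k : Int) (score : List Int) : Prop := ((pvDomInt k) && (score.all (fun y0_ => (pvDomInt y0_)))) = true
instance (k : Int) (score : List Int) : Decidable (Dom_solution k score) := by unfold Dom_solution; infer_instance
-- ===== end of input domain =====

-- B replaces A's per-element full re-sort of the k best scores by one binary-search insertion
-- into an ascending list (dropping the smallest when it exceeds k); same return value on Pre_.

-- ===== PORT A =====
def solution (k : Int) (score : List Int) : List Int :=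
  (score.foldl (fun (acc : List Int × List Int) s =>
      let stack := acc.1
      let stack1 :=
        if (stack.length : Int) < k then stack ++ [s]            -- stack.append(s)
        else if (PySem.List.pyGet? stack (-1)).getD 0 < s then   -- s > stack[-1]  (IndexError on empty stack is excluded by Pre_, getD unreachable there)
          ((PySem.List.pop? stack (-1)).getD (0, stack)).2 ++ [s] -- stack.pop(); stack.append(s)
        else stack
      let stack2 := PySem.List.sorted stack1 (fun x => x) true   -- sorted(stack, reverse=True)
      (stack2, acc.2 ++ [(PySem.List.pyGet? stack2 (-1)).getD 0])) -- res.append(stack[-1])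
    ([], [])).2

-- ===== PORT B =====
-- the `while lo < hi` binary-search loop of Source B
def bisectLoop (top : List Int) (s : Int) (lo hi : Int) : Int :=
  if h : lo < hi then
    let mid := PySem.Int.floordiv (lo + hi) 2
    if (PySem.List.pyGet? top mid).getD 0 < s then bisectLoop top s (mid + 1) hi
    else bisectLoop top s lo mid
  else lo
termination_by (hi - lo).toNat
decreasing_by
  · have := PySem.Int.floordiv_two_mid_bounds (lo := lo) (hi := hi) (le_of_lt h)
    omega
  · have h2 : PySem.Int.floordiv (lo + hi) 2 < hi := by
      rw [PySem.Int.floordiv_lt_iff_lt_mul (by omega)]; omega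
    have := PySem.Int.floordiv_two_mid_bounds (lo := lo) (hi := hi) (le_of_lt h)
    omega

def solution_alt (k : Int) (score : List Int) : List Int :=
  (score.foldl (fun (acc : List Int × List Int) s =>
      let top := acc.1
      if (top.length : Int) = k ∧ s ≤ (PySem.List.pyGet? top 0).getD 0 then -- len(top) == k and s <= top[0]  (top[0] of empty top = IndexError only when k ≤ 0, excluded by Pre_)
        (top, acc.2 ++ [(PySem.List.pyGet? top 0).getD 0])       -- res.append(top[0]); continue
      else
        let pos := bisectLoop top s 0 (top.length : Int)
        let top1 := PySem.List.insert top pos s                  -- top.insert(lo, s)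
        let top2 := if k < (top1.length : Int) then top1.drop 1 else top1 -- if len(top) > k: del top[0]
        (top2, acc.2 ++ [(PySem.List.pyGet? top2 0).getD 0]))    -- res.append(top[0])
    ([], [])).2

-- ===== PRECONDITION & SPEC =====
-- Pre_ excludes exactly the inputs where A raises IndexError: k ≤ 0 with a nonempty score
-- (the first iteration evaluates stack[-1] on the empty stack).
def Pre_solution (k : Int) (score : List Int) : Prop := 1 ≤ k ∨ score = []
instance (k : Int) (score : List Int) : Decidable (Pre_solution k score) := by unfold Pre_solution; infer_instance
def pvWitness_solution : Int × List Int := (3, [10, 100, 20, 150, 1, 100, 200])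

def Spec_solution (k : Int) (score : List Int) (out : List Int) : Prop := out = solution_alt k score
instance (k : Int) (score : List Int) (out : List Int) : Decidable (Spec_solution k score out) := by unfold Spec_solution; infer_instance

-- ===== CLAIM (what is proved, stated in full; the proofs are below) =====
def Claim_equal_solution : Prop := ∀ (k : Int) (score : List Int), Dom_solution k score → Pre_solution k score → Spec_solution k score (solution k score)

-- ===== LEMMAS AND PROOFS =====

-- named step functions (definitionally the fold bodies of the two ports)
def stackA (k : Int) (stack : List Int) (s : Int) : List Int :=
  PySem.List.sorted
    (if (stack.length : Int) < k then stack ++ [s]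
     else if (PySem.List.pyGet? stack (-1)).getD 0 < s then
       ((PySem.List.pop? stack (-1)).getD (0, stack)).2 ++ [s]
     else stack) (fun x => x) true

def stepA (k : Int) (acc : List Int × List Int) (s : Int) : List Int × List Int :=
  (stackA k acc.1 s, acc.2 ++ [(PySem.List.pyGet? (stackA k acc.1 s) (-1)).getD 0])

def topB (k : Int) (top : List Int) (s : Int) : List Int :=
  if (top.length : Int) = k ∧ s ≤ (PySem.List.pyGet? top 0).getD 0 then top
  else if k < ((PySem.List.insert top (bisectLoop top s 0 (top.length : Int)) s).length : Int) then
    (PySem.List.insert top (bisectLoop top s 0 (top.length : Int)) s).drop 1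
  else PySem.List.insert top (bisectLoop top s 0 (top.length : Int)) s

def stepB (k : Int) (acc : List Int × List Int) (s : Int) : List Int × List Int :=
  (topB k acc.1 s, acc.2 ++ [(PySem.List.pyGet? (topB k acc.1 s) 0).getD 0])

lemma solution_eq_fold (k : Int) (score : List Int) :
    solution k score = (score.foldl (stepA k) ([], [])).2 := rfl

lemma solution_alt_eq_fold (k : Int) (score : List Int) :
    solution_alt k score = (score.foldl (stepB k) ([], [])).2 := by
  unfold solution_alt
  congr 1
  congr 1
  funext acc s
  by_cases hc : (acc.1.length : Int) = k ∧ s ≤ (PySem.List.pyGet? acc.1 0).getD 0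
  · simp only [stepB, topB, if_pos hc]
  · simp only [stepB, topB, if_neg hc]

-- proof-side model of one sorted insertion
def insAsc (s : Int) : List Int → List Int
  | [] => [s]
  | x :: t => if s ≤ x then s :: x :: t else x :: insAsc s t

lemma insAsc_eq (s : Int) (l : List Int) :
    insAsc s l = l.takeWhile (fun x => decide (x < s)) ++ s :: l.dropWhile (fun x => decide (x < s)) := by
  induction l with
  | nil => rfl
  | cons x t ih =>
    by_cases hx : s ≤ x
    · simp [insAsc, hx, not_lt.mpr hx]
    · simp [insAsc, hx, lt_of_not_ge hx, ih]

lemma insAsc_perm (s : Int) (l : List Int) : (insAsc s l).Perm (s :: l) := by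
  rw [insAsc_eq]
  calc (List.takeWhile (fun x => decide (x < s)) l ++ s :: List.dropWhile (fun x => decide (x < s)) l).Perm
        (s :: (List.takeWhile (fun x => decide (x < s)) l ++ List.dropWhile (fun x => decide (x < s)) l)) :=
          List.perm_middle
    _ = (s :: l) := by rw [List.takeWhile_append_dropWhile]

lemma insAsc_length (s : Int) (l : List Int) : (insAsc s l).length = l.length + 1 := by
  simpa using (insAsc_perm s l).length_eq

lemma insAsc_pairwise (s : Int) {l : List Int} (h : l.Pairwise (· ≤ ·)) :
    (insAsc s l).Pairwise (· ≤ ·) := by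
  induction l with
  | nil => simp [insAsc]
  | cons x t ih =>
    rcases List.pairwise_cons.mp h with ⟨hx, ht⟩
    by_cases hs : s ≤ x
    · rw [insAsc, if_pos hs]
      refine List.pairwise_cons.mpr ⟨?_, h⟩
      intro y hy
      rcases List.mem_cons.mp hy with rfl | hy
      · exact hs
      · exact le_trans hs (hx _ hy)
    · rw [insAsc, if_neg hs]
      refine List.pairwise_cons.mpr ⟨?_, ih ht⟩
      intro y hy
      have : y = s ∨ y ∈ t := by
        have := (insAsc_perm s t).mem_iff.mp hy
        simpa using this
      rcases this with rfl | hy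
      · exact le_of_not_ge hs
      · exact hx _ hy

-- the binary search returns the length of the (< s)-prefix of a sorted list
lemma bisectLoop_spec (top : List Int) (s : Int) (hst : top.Pairwise (· ≤ ·)) :
    ∀ (n : Nat) (lo hi : Int), (hi - lo).toNat ≤ n →
      0 ≤ lo → lo ≤ ((top.takeWhile (fun x => decide (x < s))).length : Int) →
      ((top.takeWhile (fun x => decide (x < s))).length : Int) ≤ hi → hi ≤ (top.length : Int) →
      bisectLoop top s lo hi = ((top.takeWhile (fun x => decide (x < s))).length : Int) := by
  set tw := top.takeWhile (fun x => decide (x < s)) with htw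
  set dw := top.dropWhile (fun x => decide (x < s)) with hdw
  have hsplit : tw ++ dw = top :=
    List.takeWhile_append_dropWhile
  have hlens := congrArg List.length hsplit
  simp only [List.length_append] at hlens
  have F1 : ∀ (i : Nat) (_ : i < (tw).length)
      (h2 : i < top.length), top[i] < s := by
    intro i h1 h2
    have hq : top[i]? = (tw)[i]? := by
      conv_lhs => rw [← hsplit]
      exact List.getElem?_append_left h1
    rw [List.getElem?_eq_getElem h2, List.getElem?_eq_getElem h1] at hq
    have hmem : (tw)[i] ∈ tw :=
      List.getElem_mem _
    have hp := List.mem_takeWhile_imp hmem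
    simp only [Option.some_inj] at hq
    rw [hq]
    exact of_decide_eq_true hp
  have F2 : ∀ (i : Nat) (_ : (tw).length ≤ i)
      (h2 : i < top.length), s ≤ top[i] := by
    intro i hge h2
    have hwlt : (tw).length < top.length := lt_of_le_of_lt hge h2
    have hdne : dw ≠ [] := by
      intro hnil; rw [hnil] at hlens; simp at hlens; omega
    have hv : top[(tw).length]? =
        some ((dw).head hdne) := by
      conv_lhs => rw [← hsplit]
      rw [List.getElem?_append_right (le_refl _)]
      obtain ⟨a, t, hat⟩ : ∃ a t, dw = a :: t := by
        cases hdw2 : dw with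
        | nil => exact absurd hdw2 hdne
        | cons a t => exact ⟨a, t, rfl⟩
      simp [hat]
    rw [List.getElem?_eq_getElem hwlt] at hv
    have hph := List.head_dropWhile_not (fun x => decide (x < s)) hdne
    have hsw : s ≤ top[(tw).length] := by
      rw [Option.some_inj.mp hv]
      simp only [decide_eq_false_iff_not, not_lt] at hph
      exact hph
    rcases eq_or_lt_of_le hge with heq | hlt
    · subst heq; exact hsw
    · exact le_trans hsw ((List.pairwise_iff_getElem.mp hst) _ _ hwlt h2 hlt)
  intro n
  induction n with
  | zero =>
    intro lo hi hfuel h0 hlow hwhi hhil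
    rw [bisectLoop, dif_neg (by omega)]
    omega
  | succ n ih =>
    intro lo hi hfuel h0 hlow hwhi hhil
    by_cases h : lo < hi
    · rw [bisectLoop, dif_pos h]
      show (if (PySem.List.pyGet? top (PySem.Int.floordiv (lo + hi) 2)).getD 0 < s then
              bisectLoop top s (PySem.Int.floordiv (lo + hi) 2 + 1) hi
            else bisectLoop top s lo (PySem.Int.floordiv (lo + hi) 2)) = _
      have hb := PySem.Int.floordiv_two_mid_bounds (lo := lo) (hi := hi) (le_of_lt h)
      have hmidlt : PySem.Int.floordiv (lo + hi) 2 < hi := by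
        rw [PySem.Int.floordiv_lt_iff_lt_mul (by omega)]; omega
      set mid := PySem.Int.floordiv (lo + hi) 2 with hmid
      have hget : PySem.List.pyGet? top mid = some top[mid.toNat] :=
        PySem.List.pyGet?_eq_some_getElem top (by omega) (by omega)
      rw [hget]
      simp only [Option.getD_some]
      by_cases hc : top[mid.toNat] < s
      · rw [if_pos hc]
        apply ih (mid + 1) hi (by omega) (by omega) ?_ hwhi hhil
        by_contra hcon
        exact absurd (F2 mid.toNat (by omega) (by omega)) (not_le.mpr hc)
      · rw [if_neg hc]
        apply ih lo mid (by omega) h0 hlow ?_ (by omega)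
        by_contra hcon
        exact absurd (F1 mid.toNat (by omega) (by omega)) hc
    · rw [bisectLoop, dif_neg h]
      omega

lemma insert_bisect (top : List Int) (s : Int) (hst : top.Pairwise (· ≤ ·)) :
    PySem.List.insert top (bisectLoop top s 0 (top.length : Int)) s = insAsc s top := by
  rw [insAsc_eq]
  set tw := top.takeWhile (fun x => decide (x < s)) with htw
  set dw := top.dropWhile (fun x => decide (x < s)) with hdw
  have hsplit : tw ++ dw = top :=
    List.takeWhile_append_dropWhile
  have hlens := congrArg List.length hsplit
  simp only [List.length_append] at hlens
  have hwle : (tw).length ≤ top.length := by omega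
  have hw := bisectLoop_spec top s hst ((top.length : Int) - 0).toNat 0 (top.length : Int)
    (le_refl _) (le_refl 0) (by positivity) (by exact_mod_cast hwle) (le_refl _)
  rw [← htw] at hw
  rw [hw, PySem.List.insert_natCast top _ s hwle]
  congr 1
  · conv_lhs => rw [← hsplit, List.take_left]
  · congr 1
    conv_lhs => rw [← hsplit, List.drop_left]

-- Python's sorted(·, reverse=True) equals any descending rearrangement (Int elements)
lemma sortedDesc_eq {xs ys : List Int} (hp : ys.Perm xs) (hs : ys.Pairwise (fun a b => b ≤ a)) :
    PySem.List.sorted xs (fun x => x) true = ys := by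
  refine PySem.List.eq_of_perm_of_pairwise_le_of_injective (key := fun x => -x) neg_injective
    ((PySem.List.sorted_perm xs (fun x => x) true).trans hp.symm) ?_ ?_
  · exact (PySem.List.sorted_pairwise_rev xs (fun x => x)).imp (fun h => by simpa using h)
  · exact hs.imp (fun h => by simpa using h)

lemma emit_eq (l : List Int) :
    (PySem.List.pyGet? l.reverse (-1)).getD 0 = (PySem.List.pyGet? l 0).getD 0 := by
  rw [PySem.List.pyGet?_neg_one, PySem.List.pyGet?_zero, List.getLast?_reverse, List.head?_eq_getElem?]

-- one step of A (on the reversed state) is one step of B, and B's invariants persist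
lemma step_main (k s : Int) (top : List Int) (hk : 1 ≤ k) (htop : top.Pairwise (· ≤ ·))
    (hlen : (top.length : Int) ≤ k) :
    stackA k top.reverse s = (topB k top s).reverse ∧ (topB k top s).Pairwise (· ≤ ·) ∧
      ((topB k top s).length : Int) ≤ k := by
  have hins := insert_bisect top s htop
  unfold topB stackA
  rw [hins, insAsc_length]
  simp only [List.length_reverse]
  by_cases hlt : (top.length : Int) < k
  · have hg1 : ¬ ((top.length : Int) = k ∧ s ≤ (PySem.List.pyGet? top 0).getD 0) :=
      fun h => absurd h.1 (ne_of_lt hlt)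
    rw [if_pos hlt, if_neg hg1,
      if_neg (show ¬ k < ((top.length + 1 : Nat) : Int) by push_cast; omega)]
    refine ⟨?_, insAsc_pairwise s htop, by push_cast [insAsc_length]; omega⟩
    apply sortedDesc_eq
    · exact ((insAsc s top).reverse_perm.trans (insAsc_perm s top)).trans
        ((List.perm_append_singleton s top).symm.trans
          (List.Perm.append_right [s] top.reverse_perm.symm))
    · exact List.pairwise_reverse.mpr (insAsc_pairwise s htop)
  · have hkeq : (top.length : Int) = k := by omega
    rw [if_neg hlt]
    cases top with
    | nil => exfalso; simp at hkeq; omega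
    | cons m rest =>
      rw [List.reverse_cons, PySem.List.pyGet?_neg_one_append_singleton]
      simp only [Option.getD_some]
      by_cases hms : m < s
      · have hg2 : ¬ (((m :: rest).length : Int) = k ∧ s ≤ (PySem.List.pyGet? (m :: rest) 0).getD 0) := by
          simp only [PySem.List.pyGet?_zero_cons, Option.getD_some]
          exact fun h => absurd h.2 (not_le.mpr hms)
        rw [if_neg hg2,
          if_pos (show k < (((m :: rest).length + 1 : Nat) : Int) by push_cast; omega)]
        rw [if_pos hms, PySem.List.pop?_last, Option.getD_some]
        rw [insAsc, if_neg (not_le.mpr hms)]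
        simp only [List.drop_succ_cons, List.drop_zero]
        have hrest : rest.Pairwise (· ≤ ·) := (List.pairwise_cons.mp htop).2
        refine ⟨?_, insAsc_pairwise s hrest, ?_⟩
        · apply sortedDesc_eq
          · exact ((insAsc s rest).reverse_perm.trans (insAsc_perm s rest)).trans
              ((List.perm_append_singleton s rest).symm.trans
                (List.Perm.append_right [s] rest.reverse_perm.symm))
          · exact List.pairwise_reverse.mpr (insAsc_pairwise s hrest)
        · rw [insAsc_length]
          simp only [List.length_cons] at hkeq
          push_cast at hkeq ⊢
          omega
      · have hg3 : ((m :: rest).length : Int) = k ∧ s ≤ (PySem.List.pyGet? (m :: rest) 0).getD 0 := by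
          simp only [PySem.List.pyGet?_zero_cons, Option.getD_some]
          exact ⟨hkeq, le_of_not_gt hms⟩
        rw [if_pos hg3, if_neg hms]
        refine ⟨?_, htop, hlen⟩
        rw [← List.reverse_cons]
        exact PySem.List.sorted_rev_eq_self_of_pairwise _ _
          (List.pairwise_reverse.mpr (htop.imp (fun h => h)))

lemma loop_eq (k : Int) (hk : 1 ≤ k) :
    ∀ (sc top res : List Int), top.Pairwise (· ≤ ·) → (top.length : Int) ≤ k →
      (sc.foldl (stepA k) (top.reverse, res)).2 = (sc.foldl (stepB k) (top, res)).2 := by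
  intro sc
  induction sc with
  | nil => intro top res _ _; rfl
  | cons s sc ih =>
    intro top res htop hlen
    obtain ⟨h1, h2, h3⟩ := step_main k s top hk htop hlen
    simp only [List.foldl_cons]
    have hA : stepA k (top.reverse, res) s
        = ((topB k top s).reverse, res ++ [(PySem.List.pyGet? (topB k top s) 0).getD 0]) := by
      unfold stepA
      rw [h1, emit_eq]
    rw [hA]
    exact ih (topB k top s) _ h2 h3

-- ===== VERDICT (by name: the statement is the Claim_ definition above) =====
theorem solution_spec : Claim_equal_solution := by
  intro k score _ hpre
  unfold Spec_solution
  rcases hpre with hk | rfl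
  · rw [solution_eq_fold, solution_alt_eq_fold]
    have := loop_eq k hk score [] [] (by simp) (by simp; omega)
    simpa using this
  · rfl
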